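-- pv_equiv track=rewrite | github.com/aligeromachine/finmachine | back/money_app/src/libs/decore/f.py | dropwhile
-- ===== SOURCE A (Python) =====
-- def dropwhile(sorted_dict: dict, query: str) -> dict:
--     if not query:
--         return sorted_dict
--
--     index = 0
--     for i, (key, v) in enumerate(sorted_dict.items()):
--         if key == query:
--             index = i
--             break
--
--     if not index:
--         return sorted_dict
--
--     return {key: v for i, (key, v) in enumerate(sorted_dict.items()) if index <= i}
-- ===== SOURCE B (Python) =====
-- def dropwhile(sorted_dict: dict, query: str) -> dict:
--     # one streaming pass with a 'found' flag instead of find-index-then-filter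
--     if not query:
--         return sorted_dict
--     result = {}
--     found = False
--     for key, v in sorted_dict.items():
--         found = found or key == query
--         if found:
--             result[key] = v
--     return result if result else sorted_dict
-- ===== Notes on version B (the rewrite author's own statement) =====
-- stated objective: idiomatic
-- what changed: Replaced the two-pass find-index-then-filter-by-position structure with a single streaming pass that flips a 'found' flag at the first matching key and collects from there on, falling back to the whole dict when nothing was collected.
import Mathlib
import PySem

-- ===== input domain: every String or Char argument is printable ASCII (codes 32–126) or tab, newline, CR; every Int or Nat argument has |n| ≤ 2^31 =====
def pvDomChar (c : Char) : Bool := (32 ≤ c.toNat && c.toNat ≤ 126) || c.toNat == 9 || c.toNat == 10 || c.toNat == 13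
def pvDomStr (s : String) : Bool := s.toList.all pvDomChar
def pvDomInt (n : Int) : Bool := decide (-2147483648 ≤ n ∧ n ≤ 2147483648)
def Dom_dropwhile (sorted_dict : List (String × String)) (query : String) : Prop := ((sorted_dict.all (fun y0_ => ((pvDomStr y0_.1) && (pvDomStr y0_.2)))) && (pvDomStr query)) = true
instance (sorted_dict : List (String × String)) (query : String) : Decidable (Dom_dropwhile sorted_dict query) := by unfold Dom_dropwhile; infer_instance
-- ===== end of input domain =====

-- B changes the decomposition: one streaming pass with a 'found' flag instead of A's
-- find-index-then-filter-by-position two passes; same cost, same values everywhere.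
-- The dict argument/results are modelled as association lists (a Python dict's keys are
-- distinct, so dict building is ported as plain list building, exact on such inputs).

-- ===== PORT A =====
-- the for-loop with break: first index whose key equals query, else the initial 0
def pvIndexLoop (q : String) : List (Int × (String × String)) → Int
  | [] => 0
  | (i, kv) :: rest => if kv.1 = q then i else pvIndexLoop q rest

def dropwhile (sorted_dict : List (String × String)) (query : String) : List (String × String) :=
  if query = "" then sorted_dict
  else
    let index := pvIndexLoop query (PySem.List.enumerate sorted_dict)
    if index = 0 then sorted_dict
    else
      -- dict comprehension over enumerate(items) keeping positions index ≤ i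
      (PySem.List.enumerate sorted_dict).filterMap
        (fun p => if index ≤ p.1 then some p.2 else none)

-- ===== PORT B =====
def dropwhile_alt (sorted_dict : List (String × String)) (query : String) : List (String × String) :=
  if query = "" then sorted_dict
  else
    let st := sorted_dict.foldl
      (fun (st : List (String × String) × Bool) kv =>
        let found := st.2 || (kv.1 == query)
        (if found then st.1 ++ [kv] else st.1, found))
      ([], false)
    if st.1 = [] then sorted_dict else st.1

-- ===== PRECONDITION & SPEC =====
def Spec_dropwhile (sorted_dict : List (String × String)) (query : String) (out : List (String × String)) : Prop := out = dropwhile_alt sorted_dict query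
instance (sorted_dict : List (String × String)) (query : String) (out : List (String × String)) : Decidable (Spec_dropwhile sorted_dict query out) := by unfold Spec_dropwhile; infer_instance

-- ===== CLAIM (what is proved, stated in full; the proofs are below) =====
def Claim_equal_dropwhile : Prop := ∀ (sorted_dict : List (String × String)) (query : String), Dom_dropwhile sorted_dict query → Spec_dropwhile sorted_dict query (dropwhile sorted_dict query)

-- ===== LEMMAS AND PROOFS =====

-- position of the first matching key (proof-only abbreviation)
def pvJ (sd : List (String × String)) (q : String) : Nat :=
  (sd.takeWhile (fun kv => !(kv.1 == q))).length

theorem pvIndexLoop_enumerate (sd : List (String × String)) (q : String) (s : Int) :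
    pvIndexLoop q (PySem.List.enumerate sd s)
      = if sd.any (fun kv => kv.1 == q) then s + (pvJ sd q : Int) else 0 := by
  induction sd generalizing s with
  | nil => simp [PySem.List.enumerate, pvIndexLoop]
  | cons kv rest ih =>
    obtain ⟨k, v⟩ := kv
    rw [PySem.List.enumerate_cons]
    by_cases h : k = q
    · simp [pvIndexLoop, h, pvJ]
    · simp only [pvIndexLoop, h, if_false, ih, List.any_cons, pvJ]
      rw [List.takeWhile_cons]
      by_cases ha : rest.any (fun kv => kv.1 == q) = true
      · simp [ha, h]; ring
      · simp [ha, h]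

theorem pvFilterMap_enumerate_drop (sd : List (String × String)) (s n : Int) :
    (PySem.List.enumerate sd s).filterMap (fun p => if n ≤ p.1 then some p.2 else none)
      = sd.drop (n - s).toNat := by
  induction sd generalizing s with
  | nil => simp [PySem.List.enumerate]
  | cons kv rest ih =>
    rw [PySem.List.enumerate_cons, List.filterMap_cons]
    by_cases h : n ≤ s
    · have h0 : (n - s).toNat = 0 := by omega
      have h1 : (n - (s + 1)).toNat = 0 := by omega
      simp [h, ih, h0, h1]
    · have h2 : (n - s).toNat = (n - (s + 1)).toNat + 1 := by omega
      simp [h, ih, h2]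

theorem pvFoldB_true (q : String) (sd : List (String × String)) (acc : List (String × String)) :
    sd.foldl (fun (st : List (String × String) × Bool) kv =>
        let found := st.2 || (kv.1 == q)
        (if found then st.1 ++ [kv] else st.1, found)) (acc, true)
      = (acc ++ sd, true) := by
  induction sd generalizing acc with
  | nil => simp
  | cons kv rest ih =>
    rw [List.foldl_cons]
    show (rest.foldl _ (if (true || (kv.1 == q)) = true then acc ++ [kv] else acc, true || (kv.1 == q))) = _
    rw [Bool.true_or, if_pos rfl, ih]
    simp

theorem pvFoldB_false (q : String) (sd : List (String × String)) (acc : List (String × String)) :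
    (sd.foldl (fun (st : List (String × String) × Bool) kv =>
        let found := st.2 || (kv.1 == q)
        (if found then st.1 ++ [kv] else st.1, found)) (acc, false)).1
      = acc ++ sd.drop (pvJ sd q) := by
  induction sd generalizing acc with
  | nil => simp [pvJ]
  | cons kv rest ih =>
    rw [List.foldl_cons]
    show (rest.foldl _ (if (false || (kv.1 == q)) = true then acc ++ [kv] else acc, false || (kv.1 == q))).1 = _
    rw [Bool.false_or]
    by_cases h : kv.1 = q
    · rw [if_pos (by simp [h]), show (kv.1 == q) = true by simp [h], pvFoldB_true]
      simp [pvJ, h]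
    · rw [if_neg (by simp [h]), show (kv.1 == q) = false by simp [h], ih]
      simp only [pvJ]
      rw [List.takeWhile_cons]
      simp [h]

-- ===== VERDICT (by name: the statement is the Claim_ definition above) =====
theorem dropwhile_spec : Claim_equal_dropwhile := by
  intro sd q _
  unfold Spec_dropwhile dropwhile dropwhile_alt
  by_cases hq : q = ""
  · simp [hq]
  · simp only [hq, if_false]
    rw [pvIndexLoop_enumerate, pvFoldB_false, List.nil_append]
    by_cases ha : sd.any (fun kv => kv.1 == q) = true
    · have hjlt : pvJ sd q < sd.length := by
        by_contra hge
        have : sd.takeWhile (fun kv => !(kv.1 == q)) = sd := by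
          refine (List.takeWhile_sublist _).eq_of_length_le ?_
          simpa [pvJ] using hge
        obtain ⟨kv, hmem, hk⟩ := List.any_eq_true.mp ha
        have := List.mem_takeWhile_imp (this ▸ hmem)
        simp [hk] at this
      have hne : sd.drop (pvJ sd q) ≠ [] := by
        simp [List.drop_eq_nil_iff]; omega
      simp only [ha, if_true, zero_add]
      by_cases hj0 : pvJ sd q = 0
      · simp [hj0]
      · have : ((pvJ sd q : Int)) ≠ 0 := by exact_mod_cast hj0
        simp only [this, if_false, hne]
        rw [pvFilterMap_enumerate_drop]
        simp
    · have hall : ∀ kv ∈ sd, (!(kv.1 == q)) = true := by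
        intro kv hmem
        rw [List.any_eq_true] at ha
        push Not at ha
        simpa using ha kv hmem
      have : sd.takeWhile (fun kv => !(kv.1 == q)) = sd := List.takeWhile_eq_self_iff.mpr hall
      simp [ha, pvJ, this]
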